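-- pv_equiv track=rewrite | github.com/neilkale/qmia-unseen-classes | cifar_architectures.py | _get_optimal_groups
-- ===== SOURCE A (Python) =====
-- def _get_optimal_groups(channels, base_groups=8, strategy="small_groups"):
--     """Get optimal number of groups for GroupNorm based on channel count."""
--
--     if strategy == "individual":
--         # Individual channel normalization (closest to BatchNorm)
--         # Each channel gets its own normalization
--         return channels
--
--     elif strategy == "small_groups":
--         # Target 2-4 channels per group for good normalization with some cross-channel interaction
--         if channels <= 4:
--             return channels
--         elif channels <= 8:
--             return channels // 2
--         else:
--             # Target ~4 channels per group
--             target_groups = channels // 4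
--             for groups in range(target_groups, 0, -1):
--                 if channels % groups == 0:
--                     return groups
--             return 1
--
--     elif strategy == "fixed_8":
--         # Fixed 8 groups (original approach)
--         for groups in range(min(8, channels), 0, -1):
--             if channels % groups == 0:
--                 return groups
--         return 1
--
--     else:
--         # Default: individual channel normalization
--         return channels
-- ===== SOURCE B (Python) =====
-- def _largest_divisor_le(n, limit):
--     """Largest divisor of n that is <= limit, found by sqrt-bounded divisor
--     enumeration (records i and n//i for every i with i*i <= n); 1 if n or
--     limit is non-positive (no candidate exists there)."""
--     if n <= 0 or limit <= 0:
--         return 1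
--     best = 1
--     i = 1
--     while i * i <= n:
--         if n % i == 0:
--             if i <= limit and i > best:
--                 best = i
--             j = n // i
--             if j <= limit and j > best:
--                 best = j
--         i += 1
--     return best
--
--
-- def _get_optimal_groups(channels, base_groups=8, strategy="small_groups"):
--     """Get optimal number of groups for GroupNorm based on channel count."""
--
--     if strategy == "individual":
--         return channels
--
--     elif strategy == "small_groups":
--         if channels <= 4:
--             return channels
--         elif channels <= 8:
--             return channels // 2
--         else:
--             # largest divisor of channels not exceeding ~channels/4
--             return _largest_divisor_le(channels, channels // 4)
--
--     elif strategy == "fixed_8":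
--         return _largest_divisor_le(channels, min(8, channels))
--
--     else:
--         return channels
-- ===== Notes on version B (the rewrite author's own statement) =====
-- stated objective: faster
-- what changed: The downward linear scans for a divisor are replaced by a sqrt-bounded divisor enumeration (record i and channels//i for every i with i*i <= channels, keep the largest one <= target), turning the O(channels) scan into O(sqrt(channels)).
import Mathlib
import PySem

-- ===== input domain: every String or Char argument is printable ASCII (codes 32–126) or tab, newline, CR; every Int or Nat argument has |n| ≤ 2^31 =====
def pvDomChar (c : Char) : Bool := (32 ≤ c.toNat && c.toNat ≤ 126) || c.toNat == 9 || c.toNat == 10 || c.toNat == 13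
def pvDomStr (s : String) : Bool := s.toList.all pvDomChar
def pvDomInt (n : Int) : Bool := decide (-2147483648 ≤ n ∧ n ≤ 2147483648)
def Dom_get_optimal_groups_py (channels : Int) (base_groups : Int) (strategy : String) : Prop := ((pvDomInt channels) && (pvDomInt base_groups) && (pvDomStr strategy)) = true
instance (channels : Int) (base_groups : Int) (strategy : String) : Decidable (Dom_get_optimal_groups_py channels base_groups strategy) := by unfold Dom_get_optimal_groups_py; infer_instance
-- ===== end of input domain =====

-- B replaces A's downward linear divisor scans by a sqrt-bounded divisor
-- enumeration (collect i and channels//i for i*i ≤ channels, keep the largest ≤ target).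

-- ===== PORT A =====
-- 'for groups in range(t, 0, -1): if channels % groups == 0: return groups' / 'return 1'
def aScan (channels : Int) : List Int → Int
  | [] => 1
  | g :: rest => if PySem.Int.mod channels g == 0 then g else aScan channels rest

def get_optimal_groups_py (channels : Int) (base_groups : Int) (strategy : String) : Int :=
  if strategy == "individual" then
    channels
  else if strategy == "small_groups" then
    if channels ≤ 4 then channels
    else if channels ≤ 8 then PySem.Int.floordiv channels 2
    else
      aScan channels (PySem.List.pyRange (PySem.Int.floordiv channels 4) 0 (-1))
  else if strategy == "fixed_8" then
    aScan channels (PySem.List.pyRange (min 8 channels) 0 (-1))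
  else
    channels

-- ===== PORT B =====
-- the 'while i * i <= n' loop of _largest_divisor_le (fuel only makes it total;
-- the loop exits by its own condition well within n.toNat + 1 steps)
def bLoop (n limit : Int) : Nat → Int → Int → Int
  | 0, _, best => best
  | fuel+1, i, best =>
    if i * i ≤ n then
      let best' :=
        if PySem.Int.mod n i == 0 then
          let b1 := if i ≤ limit ∧ best < i then i else best
          let j := PySem.Int.floordiv n i
          if j ≤ limit ∧ b1 < j then j else b1
        else best
      bLoop n limit fuel (i+1) best'
    else best

def largestDivisorLe (n limit : Int) : Int :=
  if n ≤ 0 ∨ limit ≤ 0 then 1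
  else bLoop n limit (n.toNat + 1) 1 1

def get_optimal_groups_py_alt (channels : Int) (base_groups : Int) (strategy : String) : Int :=
  if strategy == "individual" then
    channels
  else if strategy == "small_groups" then
    if channels ≤ 4 then channels
    else if channels ≤ 8 then PySem.Int.floordiv channels 2
    else largestDivisorLe channels (PySem.Int.floordiv channels 4)
  else if strategy == "fixed_8" then
    largestDivisorLe channels (min 8 channels)
  else
    channels

-- ===== PRECONDITION & SPEC =====
def Spec_get_optimal_groups_py (channels : Int) (base_groups : Int) (strategy : String) (out : Int) : Prop := out = get_optimal_groups_py_alt channels base_groups strategy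
instance (channels : Int) (base_groups : Int) (strategy : String) (out : Int) : Decidable (Spec_get_optimal_groups_py channels base_groups strategy out) := by unfold Spec_get_optimal_groups_py; infer_instance

-- ===== CLAIM (what is proved, stated in full; the proofs are below) =====
def Claim_equal_get_optimal_groups_py : Prop := ∀ (channels : Int) (base_groups : Int) (strategy : String), Dom_get_optimal_groups_py channels base_groups strategy → Spec_get_optimal_groups_py channels base_groups strategy (get_optimal_groups_py channels base_groups strategy)

-- ===== LEMMAS AND PROOFS =====

-- "r is the greatest divisor of n that is ≤ t"
def IsGD (n t r : Int) : Prop :=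
  r ∣ n ∧ 1 ≤ r ∧ r ≤ t ∧ ∀ d : Int, d ∣ n → 1 ≤ d → d ≤ t → d ≤ r

theorem IsGD_unique {n t a b : Int} (ha : IsGD n t a) (hb : IsGD n t b) : a = b :=
  le_antisymm (hb.2.2.2 a ha.1 ha.2.1 ha.2.2.1) (ha.2.2.2 b hb.1 hb.2.1 hb.2.2.1)

theorem aScan_spec (n : Int) (hn : 0 < n) :
    ∀ t : Int, 1 ≤ t → IsGD n t (aScan n (PySem.List.pyRange t 0 (-1))) := by
  intro t ht
  induction t, ht using Int.le_induction with
  | base =>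
    rw [PySem.List.pyRange_neg_one_cons (by norm_num : (0:Int) < 1),
        PySem.List.pyRange_neg_one_eq_nil (by norm_num : (1:Int) - 1 ≤ 0)]
    simp only [aScan]
    have h1 : PySem.Int.mod n 1 = 0 := (PySem.Int.mod_eq_zero_iff_dvd n 1).mpr (one_dvd n)
    simp [h1]
    exact ⟨one_dvd n, le_refl 1, le_refl 1, fun d _ hd hdt => hdt⟩
  | succ t ht ih =>
    rw [PySem.List.pyRange_neg_one_cons (by omega : (0:Int) < t + 1)]
    simp only [aScan]
    by_cases hmod : PySem.Int.mod n (t + 1) = 0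
    · have hdvd : (t + 1) ∣ n := (PySem.Int.mod_eq_zero_iff_dvd n (t+1)).mp hmod
      simp only [hmod]
      simp
      exact ⟨hdvd, by omega, le_refl _, fun d _ _ hdt => hdt⟩
    · have hne : (PySem.Int.mod n (t+1) == 0) = false := by
        simp [hmod]
      simp only [hne, Bool.false_eq_true, if_false]
      have hsub : t + 1 - 1 = t := by ring
      rw [hsub]
      have hr := ih
      obtain ⟨hdvd, hge, hle, hmax⟩ := hr
      refine ⟨hdvd, hge, by omega, fun d hdn hd1 hdt => ?_⟩
      rcases lt_or_eq_of_le hdt with h | h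
      · exact hmax d hdn hd1 (by omega)
      · exfalso; apply hmod
        rw [PySem.Int.mod_eq_zero_iff_dvd]; rw [← h]; exact hdn

-- at loop exit every divisor has been seen: min(d, n/d) < i once n < i*i
theorem seen_at_exit {n i d : Int} (hn : 0 < n) (hi : 1 ≤ i) (hexit : n < i * i)
    (hdn : d ∣ n) (hd1 : 1 ≤ d) : d < i ∨ n / d < i := by
  by_contra h
  push_neg at h
  obtain ⟨h1, h2⟩ := h
  have hq : d * (n / d) = n := Int.mul_ediv_cancel' hdn
  have : i * i ≤ d * (n / d) :=
    mul_le_mul h1 h2 (by omega) (by omega)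
  omega

theorem cofactor_pos {n d : Int} (hn : 0 < n) (hd1 : 1 ≤ d) (hdn : d ∣ n) : 1 ≤ n / d := by
  by_contra h
  push_neg at h
  have hq : d * (n / d) = n := Int.mul_ediv_cancel' hdn
  nlinarith

theorem bLoop_spec (n limit : Int) (hn : 0 < n) (hl : 1 ≤ limit) :
    ∀ (fuel : Nat) (i best : Int), 1 ≤ i → n < (i + fuel) * (i + fuel) →
      best ∣ n → 1 ≤ best → best ≤ limit →
      (∀ d : Int, d ∣ n → 1 ≤ d → d ≤ limit → (d < i ∨ n / d < i) → d ≤ best) →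
      IsGD n limit (bLoop n limit fuel i best) := by
  intro fuel
  induction fuel with
  | zero =>
    intro i best hi hfuel hbdvd hb1 hbl hseen
    simp only [bLoop]
    refine ⟨hbdvd, hb1, hbl, fun d hdn hd1 hdl => ?_⟩
    have : n < i * i := by push_cast at hfuel; linarith
    exact hseen d hdn hd1 hdl (seen_at_exit hn hi this hdn hd1)
  | succ fuel ih =>
    intro i best hi hfuel hbdvd hb1 hbl hseen
    simp only [bLoop]
    by_cases hcond : i * i ≤ n
    · simp only [hcond, if_true]
      set j := PySem.Int.floordiv n i with hj
      by_cases hmod : PySem.Int.mod n i = 0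
      · have hidvd : i ∣ n := (PySem.Int.mod_eq_zero_iff_dvd n i).mp hmod
        have hjeq : j = n / i := by rw [hj, PySem.Int.floordiv_eq_ediv_of_pos (by omega)]
        have hji : i * j = n := by rw [hjeq]; exact Int.mul_ediv_cancel' hidvd
        have hjdvd : j ∣ n := ⟨i, by linarith [hji, mul_comm i j]⟩
        have hj1 : 1 ≤ j := by rw [hjeq]; exact cofactor_pos hn hi hidvd
        simp only [hmod, beq_self_eq_true, if_true]
        set b1 := if i ≤ limit ∧ best < i then i else best with hb1def
        set b2 := if j ≤ limit ∧ b1 < j then j else b1 with hb2def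
        have hb1props : b1 ∣ n ∧ 1 ≤ b1 ∧ b1 ≤ limit ∧ best ≤ b1 ∧ (i ≤ limit → i ≤ b1) := by
          rw [hb1def]; split_ifs with h
          · exact ⟨hidvd, by omega, h.1, by omega, fun _ => le_refl i⟩
          · refine ⟨hbdvd, hb1, hbl, le_refl _, fun hil => ?_⟩; omega
        have hb2props : b2 ∣ n ∧ 1 ≤ b2 ∧ b2 ≤ limit ∧ b1 ≤ b2 ∧ (j ≤ limit → j ≤ b2) := by
          rw [hb2def]; split_ifs with h
          · exact ⟨hjdvd, by omega, h.1, by omega, fun _ => le_refl j⟩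
          · refine ⟨hb1props.1, hb1props.2.1, hb1props.2.2.1, le_refl _, fun hjl => ?_⟩; omega
        apply ih (i + 1) b2 (by omega) (by push_cast; push_cast at hfuel; linarith)
          hb2props.1 hb2props.2.1 hb2props.2.2.1
        intro d hdn hd1 hdl hmem
        have hdq : d * (n / d) = n := Int.mul_ediv_cancel' hdn
        by_cases hold : d < i ∨ n / d < i
        · have := hseen d hdn hd1 hdl hold
          have := hb1props.2.2.2.1
          have := hb2props.2.2.2.1
          omega
        · push_neg at hold
          -- new: d = i or n/d = i
          rcases hmem with h | h
          · have hdi : d = i := by omega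
            subst hdi
            have := hb2props.2.2.2.1
            have := hb1props.2.2.2.2 hdl
            omega
          · have hndi : n / d = i := by omega
            have hdj : d = j := by
              have : d * i = n := by rw [← hndi]; exact hdq
              nlinarith [hji]
            subst hdj
            exact hb2props.2.2.2.2 hdl
      · -- i does not divide n: best unchanged
        have hne : (PySem.Int.mod n i == 0) = false := by simp [hmod]
        simp only [hne, if_false]
        apply ih (i + 1) best (by omega) (by push_cast; push_cast at hfuel; linarith)
          hbdvd hb1 hbl
        intro d hdn hd1 hdl hmem
        have hdq : d * (n / d) = n := Int.mul_ediv_cancel' hdn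
        by_cases hold : d < i ∨ n / d < i
        · exact hseen d hdn hd1 hdl hold
        · push_neg at hold
          exfalso; apply hmod
          rw [PySem.Int.mod_eq_zero_iff_dvd]
          rcases hmem with h | h
          · have : d = i := by omega
            rw [← this]; exact hdn
          · have : n / d = i := by omega
            exact ⟨d, by rw [← this]; linarith [hdq, mul_comm d (n / d)]⟩
    · simp only [hcond, if_false]
      refine ⟨hbdvd, hb1, hbl, fun d hdn hd1 hdl => ?_⟩
      exact hseen d hdn hd1 hdl (seen_at_exit hn hi (by omega) hdn hd1)

theorem largestDivisorLe_spec (n limit : Int) (hn : 0 < n) (hl : 1 ≤ limit) :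
    IsGD n limit (largestDivisorLe n limit) := by
  unfold largestDivisorLe
  rw [if_neg (by omega)]
  apply bLoop_spec n limit hn hl (n.toNat + 1) 1 1 (le_refl 1)
  · have : ((n.toNat : Int)) = n := Int.toNat_of_nonneg (by omega)
    push_cast
    nlinarith
  · exact one_dvd n
  · exact le_refl 1
  · exact hl
  · intro d hdn hd1 _ hmem
    rcases hmem with h | h
    · omega
    · have := cofactor_pos hn hd1 hdn
      omega

-- empty-scan case: channels ≤ 0 in fixed_8
theorem aScan_nil (channels : Int) : aScan channels [] = 1 := rfl

-- ===== VERDICT (by name: the statement is the Claim_ definition above) =====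
theorem get_optimal_groups_py_spec : Claim_equal_get_optimal_groups_py := by
  intro channels base_groups strategy _
  unfold Spec_get_optimal_groups_py
  unfold get_optimal_groups_py get_optimal_groups_py_alt
  split_ifs with h1 h2 h3 h4 h5
  · rfl
  · rfl
  · rfl
  · -- small_groups, channels > 8: both compute greatest divisor ≤ channels // 4
    have hc : 8 < channels := by omega
    have ht : PySem.Int.floordiv channels 4 = channels / 4 :=
      PySem.Int.floordiv_eq_ediv_of_pos (by norm_num)
    have ht1 : 1 ≤ PySem.Int.floordiv channels 4 := by
      rw [ht]; omega
    exact IsGD_unique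
      (aScan_spec channels (by omega) _ ht1)
      (largestDivisorLe_spec channels _ (by omega) ht1)
  · -- fixed_8
    by_cases hc : 0 < channels
    · have ht1 : 1 ≤ min 8 channels := by omega
      exact IsGD_unique
        (aScan_spec channels hc _ ht1)
        (largestDivisorLe_spec channels _ hc ht1)
    · -- channels ≤ 0: A's range is empty (returns 1); B's helper returns 1
      rw [PySem.List.pyRange_neg_one_eq_nil (by omega : min 8 channels ≤ 0), aScan_nil]
      unfold largestDivisorLe
      rw [if_pos (by omega)]
  · rfl
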